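-- pv_equiv track=rewrite | github.com/bmajoros/EnhancerHMM | loopy-genomewide.py | getParse
-- ===== SOURCE A (Python) =====
-- from builtins import (bytes, dict, int, list, object, range, str, ascii,
--    chr, hex, input, next, oct, open, pow, round, super, filter, map, zip)
--
-- def getSections(path):
--     sections=[]
--     L=len(path)
--     elem=[]
--     for i in range(L):
--         state=path[i]
--         eLen=len(elem)
--         if(eLen==0 or elem[eLen-1]==state): elem.append(state)
--         else:
--             sections.append(elem)
--             elem=[state]
--     if(len(elem)>0): sections.append(elem)
--     return sections
--
-- def getParse(path):
--     sections=getSections(path)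
--     parse=""
--     pos=0
--     for section in sections:
--         L=len(section)
--         type=section[0]
--         if(len(parse)>0): parse+="|"
--         begin=pos
--         end=pos+L
--         parse+=str(type)+":"+str(begin)+"-"+str(end)
--         pos+=L
--     return parse
-- ===== SOURCE B (Python) =====
-- def getParse(path):
--     # single pass: track current run's state and begin index; no sections list
--     parts = []
--     begin = 0
--     cur = None
--     pos = 0
--     for state in path:
--         if cur is not None and state != cur:
--             parts.append(str(cur) + ":" + str(begin) + "-" + str(pos))
--             begin = pos
--         cur = state
--         pos += 1
--     if cur is not None:
--         parts.append(str(cur) + ":" + str(begin) + "-" + str(pos))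
--     return "|".join(parts)
-- ===== Notes on version B (the rewrite author's own statement) =====
-- stated objective: simpler
-- what changed: B formats each run in one pass over the path, tracking only the current run's state and begin index and joining the pieces, instead of first materialising a list-of-lists of sections and then re-walking it with a position counter.
import Mathlib
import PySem

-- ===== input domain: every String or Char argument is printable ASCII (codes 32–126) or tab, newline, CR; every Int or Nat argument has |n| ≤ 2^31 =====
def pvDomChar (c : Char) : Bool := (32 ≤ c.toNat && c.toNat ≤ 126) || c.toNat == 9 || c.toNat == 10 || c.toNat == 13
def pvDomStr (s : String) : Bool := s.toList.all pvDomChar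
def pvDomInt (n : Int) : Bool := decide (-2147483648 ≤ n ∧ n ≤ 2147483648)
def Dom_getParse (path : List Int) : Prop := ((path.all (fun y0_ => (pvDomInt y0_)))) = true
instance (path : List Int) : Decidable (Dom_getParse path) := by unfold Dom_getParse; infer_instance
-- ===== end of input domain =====

-- B replaces A's two-phase sections-list construction by a single pass that formats each
-- run as it ends (objective: simpler — no intermediate list-of-lists).

-- ===== PORT A =====
-- one step of the 'for i in range(L)' loop of getSections; state = path[i]
def stepA (acc : List (List Int) × List Int) (state : Int) : List (List Int) × List Int :=
  let sections := acc.1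
  let elem := acc.2
  let eLen : Int := PySem.List.len elem
  if eLen = 0 ∨ PySem.List.pyGet? elem (eLen - 1) = some state
  then (sections, elem ++ [state])
  else (sections ++ [elem], [state])

-- the 'if(len(elem)>0): sections.append(elem)' epilogue
def finishA (r : List (List Int) × List Int) : List (List Int) :=
  if r.2.length > 0 then r.1 ++ [r.2] else r.1

def getSections (path : List Int) : List (List Int) :=
  finishA (path.foldl stepA ([], []))

-- one step of getParse's loop over sections; section[0] never raises in A because
-- getSections only produces nonempty sections, so the .getD 0 default is unreachable
def stepF (acc : String × Int) (section_ : List Int) : String × Int :=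
  let parse := acc.1
  let pos := acc.2
  let L : Int := PySem.List.len section_
  let type := (PySem.List.pyGet? section_ 0).getD 0
  let parse := if PySem.Str.len parse > 0 then parse ++ "|" else parse
  let parse := parse ++ PySem.Int.toStr type ++ ":" ++ PySem.Int.toStr pos ++ "-" ++ PySem.Int.toStr (pos + L)
  (parse, pos + L)

def getParse (path : List Int) : String :=
  (List.foldl stepF ("", 0) (getSections path)).1

-- ===== PORT B =====
def fmtRun (c b e : Int) : String :=
  PySem.Int.toStr c ++ ":" ++ PySem.Int.toStr b ++ "-" ++ PySem.Int.toStr e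

-- one step of Source B's single loop: state (parts, begin, cur, pos)
def stepB (acc : List String × Int × Option Int × Int) (state : Int) :
    List String × Int × Option Int × Int :=
  let (parts, begin_, cur, pos) := acc
  let (parts, begin_) :=
    match cur with
    | some c => if state ≠ c then (parts ++ [fmtRun c begin_ pos], pos) else (parts, begin_)
    | none => (parts, begin_)
  (parts, begin_, some state, pos + 1)

-- Source B's final 'if cur is not None: parts.append(...)'
def finishB (r : List String × Int × Option Int × Int) : List String :=
  match r with
  | (parts, begin_, some c, pos) => parts ++ [fmtRun c begin_ pos]
  | (parts, _, none, _) => parts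

def getParse_alt (path : List Int) : String :=
  PySem.Str.join "|" (finishB (path.foldl stepB ([], 0, none, 0)))

-- ===== PRECONDITION & SPEC =====
def Spec_getParse (path : List Int) (out : String) : Prop := out = getParse_alt path
instance (path : List Int) (out : String) : Decidable (Spec_getParse path out) := by unfold Spec_getParse; infer_instance

-- ===== CLAIM (what is proved, stated in full; the proofs are below) =====
def Claim_equal_getParse : Prop := ∀ (path : List Int), Dom_getParse path → Spec_getParse path (getParse path)

-- ===== LEMMAS AND PROOFS =====

-- the common shape of both programs' output: the formatted runs of the remaining list,
-- given the current run's state c, its begin index b, and the current position p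
def S (c : Int) (b p : Int) : List Int → List String
  | [] => [fmtRun c b p]
  | x :: xs => if x = c then S c b (p + 1) xs else fmtRun c b p :: S x p (p + 1) xs

-- the sections A will build from the remaining list, given a current run of k ≥ 1 copies of c
def groupsC (c : Int) (k : Nat) : List Int → List (List Int)
  | [] => [List.replicate k c]
  | x :: xs => if x = c then groupsC c (k + 1) xs else List.replicate k c :: groupsC x 1 xs

lemma pyGet?_replicate_last (k : Nat) (c : Int) (hk : 1 ≤ k) :
    PySem.List.pyGet? (List.replicate k c) ((k : Int) - 1) = some c := by
  have h : ((k : Int)) - 1 = ((k - 1 : Nat) : Int) := by omega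
  rw [h, PySem.List.pyGet?_natCast]
  simp [List.getElem?_replicate]; omega

lemma lemA1 (l : List Int) : ∀ (sections : List (List Int)) (c : Int) (k : Nat), 1 ≤ k →
    finishA (l.foldl stepA (sections, List.replicate k c)) = sections ++ groupsC c k l := by
  induction l with
  | nil =>
    intro sections c k hk
    simp [finishA, groupsC]
    omega
  | cons x xs ih =>
    intro sections c k hk
    by_cases hx : x = c
    · subst hx
      have hstep : stepA (sections, List.replicate k x) x = (sections, List.replicate (k + 1) x) := by
        simp [stepA, PySem.List.len_eq, pyGet?_replicate_last k x hk, List.replicate_succ']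
      simp only [List.foldl_cons, hstep, groupsC, if_true]
      exact ih sections x (k + 1) (by omega)
    · have hne : PySem.List.pyGet? (List.replicate k c) ((k : Int) - 1) ≠ some x := by
        rw [pyGet?_replicate_last k c hk]; simp [Ne.symm hx]
      have hstep : stepA (sections, List.replicate k c) x = (sections ++ [List.replicate k c], List.replicate 1 x) := by
        simp only [stepA, PySem.List.len_eq, List.length_replicate]
        rw [if_neg]
        · simp
        · rintro (h1 | h2)
          · omega
          · exact hne h2
      simp only [List.foldl_cons, hstep, groupsC, if_neg hx]
      rw [ih (sections ++ [List.replicate k c]) x 1 (by omega)]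
      simp

-- one step of A's format loop, as a function of the rendered string only
def joinStep (acc s : String) : String := (if PySem.Str.len acc > 0 then acc ++ "|" else acc) ++ s

lemma stepF_replicate (parse : String) (p : Int) (c : Int) (k : Nat) (hk : 1 ≤ k) :
    stepF (parse, p) (List.replicate k c) = (joinStep parse (fmtRun c p (p + k)), p + k) := by
  have h0 : PySem.List.pyGet? (List.replicate k c) 0 = some c := by
    rw [PySem.List.pyGet?_zero]
    simp [List.getElem?_replicate]; omega
  simp [stepF, joinStep, fmtRun, h0, PySem.List.len_eq, String.append_assoc]

lemma lemA3 (l : List Int) : ∀ (c : Int) (k : Nat) (p : Int) (parse : String), 1 ≤ k →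
    (List.foldl stepF (parse, p) (groupsC c k l)).1 = List.foldl joinStep parse (S c p (p + k) l) := by
  induction l with
  | nil =>
    intro c k p parse hk
    simp [groupsC, S, stepF_replicate parse p c k hk]
  | cons x xs ih =>
    intro c k p parse hk
    by_cases hx : x = c
    · subst hx
      simp only [groupsC, S, if_true]
      rw [ih x (k + 1) p parse (by omega)]
      congr 2
      push_cast
      ring
    · simp only [groupsC, S, if_neg hx, List.foldl_cons,
        stepF_replicate parse p c k hk]
      exact ih x 1 (p + k) (joinStep parse (fmtRun c p (p + k))) (by omega)

lemma lemB (l : List Int) : ∀ (parts : List String) (b : Int) (c : Int) (p : Int),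
    finishB (l.foldl stepB (parts, b, some c, p)) = parts ++ S c b p l := by
  induction l with
  | nil => intro parts b c p; simp [finishB, S]
  | cons x xs ih =>
    intro parts b c p
    by_cases hx : x = c
    · subst hx
      have hstep : stepB (parts, b, some x, p) x = (parts, b, some x, p + 1) := by
        simp [stepB]
      simp only [List.foldl_cons, hstep, S, if_true]
      exact ih parts b x (p + 1)
    · have hstep : stepB (parts, b, some c, p) x = (parts ++ [fmtRun c b p], p, some x, p + 1) := by
        simp [stepB, hx]
      simp only [List.foldl_cons, hstep, S, if_neg hx]
      rw [ih (parts ++ [fmtRun c b p]) p x (p + 1)]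
      simp

lemma fmtRun_ne_empty (c b e : Int) : fmtRun c b e ≠ "" := by
  intro h
  have := congrArg String.toList h
  simp [fmtRun, PySem.Int.toList_toStr] at this

lemma S_ne_empty (l : List Int) : ∀ (c b p : Int) (s : String), s ∈ S c b p l → s ≠ "" := by
  induction l with
  | nil => intro c b p s hs; simp [S] at hs; subst hs; exact fmtRun_ne_empty c b p
  | cons x xs ih =>
    intro c b p s hs
    by_cases hx : x = c
    · subst hx
      simp only [S, if_true] at hs
      exact ih x b (p + 1) s hs
    · simp only [S, if_neg hx, List.mem_cons] at hs
      rcases hs with hs | hs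
      · subst hs; exact fmtRun_ne_empty c b p
      · exact ih x p (p + 1) s hs

lemma len_pos_of_ne_empty (s : String) (h : s ≠ "") : PySem.Str.len s > 0 := by
  have hne : s.toList ≠ [] := by
    intro hn
    apply h
    rw [← String.ofList_toList (s := s), hn]
  have hlen : 0 < s.toList.length := List.length_pos_iff.mpr hne
  simpa [PySem.Str.len] using hlen

lemma joinStep_of_ne (acc s : String) (h : acc ≠ "") : joinStep acc s = acc ++ "|" ++ s := by
  unfold joinStep
  rw [if_pos (len_pos_of_ne_empty acc h)]

lemma append_ne_empty (a b : String) (h : a ≠ "") : a ++ b ≠ "" := by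
  intro hn
  have h2 := congrArg String.toList hn
  simp [String.toList_append] at h2
  exact h h2.1

-- Chars.join with a '|' separator, pulled apart at the head
lemma joinShift (cs : List Char) (parts : List (List Char)) :
    PySem.Chars.join ['|'] (cs :: parts) = cs ++ PySem.Chars.join ['|'] ([] :: parts) := by
  cases parts with
  | nil => simp [PySem.Chars.join, List.intercalate]
  | cons d rest => simp [PySem.Chars.join, List.intercalate, List.intersperse]

lemma foldl_joinStep_of_ne (parts : List String) : ∀ (acc : String), acc ≠ "" →
    List.foldl joinStep acc parts =
      String.ofList (acc.toList ++ PySem.Chars.join ['|'] ([] :: parts.map String.toList)) := by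
  induction parts with
  | nil =>
    intro acc hacc
    simp [PySem.Chars.join, List.intercalate]
  | cons s rest ih =>
    intro acc hacc
    simp only [List.foldl_cons, joinStep_of_ne acc s hacc]
    rw [ih (acc ++ "|" ++ s) (append_ne_empty _ _ (append_ne_empty _ _ hacc))]
    congr 1
    rw [List.map_cons, PySem.Chars.join_cons_cons, joinShift s.toList]
    simp [String.toList_append]

lemma joinSteps_eq_join (parts : List String) (hne : ∀ s ∈ parts, s ≠ "") :
    List.foldl joinStep "" parts = PySem.Str.join "|" parts := by
  cases parts with
  | nil => simp [PySem.Str.join, PySem.Chars.join, List.intercalate]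
  | cons s rest =>
    have hs : s ≠ "" := hne s (by simp)
    have h1 : joinStep "" s = s := by simp [joinStep, PySem.Str.len]
    rw [List.foldl_cons, h1, foldl_joinStep_of_ne rest s hs]
    rw [PySem.Str.join]
    congr 1
    have hbar : ("|" : String).toList = ['|'] := rfl
    rw [List.map_cons, hbar, joinShift s.toList]

-- ===== VERDICT (by name: the statement is the Claim_ definition above) =====
theorem getParse_spec : Claim_equal_getParse := by
  intro path _
  unfold Spec_getParse
  cases path with
  | nil => decide
  | cons x xs =>
    have hA : getSections (x :: xs) = groupsC x 1 xs := by
      have hstep : stepA ([], []) x = ([], List.replicate 1 x) := by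
        simp [stepA, PySem.List.len_eq]
      unfold getSections
      rw [List.foldl_cons, hstep, lemA1 xs [] x 1 (by omega)]
      simp
    have hB : getParse_alt (x :: xs) = PySem.Str.join "|" (S x 0 1 xs) := by
      unfold getParse_alt
      rw [List.foldl_cons]
      have hstep : stepB ([], 0, none, 0) x = ([], 0, some x, 1) := by
        simp [stepB]
      rw [hstep, lemB xs [] 0 x 1]
      simp
    have hAe : getParse (x :: xs) = List.foldl joinStep "" (S x 0 1 xs) := by
      unfold getParse
      rw [hA]
      have := lemA3 xs x 1 0 "" (by omega)
      simpa using this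
    rw [hAe, hB, joinSteps_eq_join _ (S_ne_empty xs x 0 1)]
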